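-- pv_equiv track=rewrite | github.com/Karna-Balaji-07/Python_2025 | Arrays/Subarrays/Element_Greater_than_K.py | greater1
-- ===== SOURCE A (Python) =====
-- def greater1(arr, element):
--     count = 0
--     number = 0
--     n = len(arr)
--     for i in range(n):
--         if arr[i] > element:
--             count += 1
--         else:
--             number += count * (count+1) // 2
--             count = 0
--
--     if count:
--         number += count * (count+1) //2
--     return int(number)
-- ===== SOURCE B (Python) =====
-- def greater1(arr, element):
--     # Barrier-position algorithm: collect the indices of elements <= element,
--     # then the answer is the sum of g*(g+1)//2 over the gaps g between
--     # consecutive barriers (with sentinels -1 and len(arr)).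
--     bounds = [i for i, x in enumerate(arr) if x <= element] + [len(arr)]
--     total = 0
--     prev = -1
--     for b in bounds:
--         g = b - prev - 1
--         total += g * (g + 1) // 2
--         prev = b
--     return int(total)
-- ===== Notes on version B (the rewrite author's own statement) =====
-- stated objective: alternative
-- what changed: B first builds the list of barrier positions (indices of elements <= element, plus a sentinel at len(arr)) and then sums g*(g+1)//2 over the gaps between consecutive barriers, instead of A's per-element streak counter with a flush on each break and a post-loop leftover branch.
import Mathlib
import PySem

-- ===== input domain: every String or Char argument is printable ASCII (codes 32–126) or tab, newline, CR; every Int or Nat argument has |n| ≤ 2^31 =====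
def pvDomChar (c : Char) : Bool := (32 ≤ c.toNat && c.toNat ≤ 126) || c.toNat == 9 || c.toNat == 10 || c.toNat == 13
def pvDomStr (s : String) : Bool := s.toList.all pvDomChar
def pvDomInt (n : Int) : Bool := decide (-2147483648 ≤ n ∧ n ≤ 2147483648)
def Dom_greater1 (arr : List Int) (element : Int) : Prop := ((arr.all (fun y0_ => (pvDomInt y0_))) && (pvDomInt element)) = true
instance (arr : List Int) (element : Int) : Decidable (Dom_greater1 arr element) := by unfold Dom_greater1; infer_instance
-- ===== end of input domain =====

-- B computes the answer from the list of barrier positions (indices of elements ≤ element)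
-- by summing triangular numbers of the gaps between consecutive barriers; objective: alternative.


-- shared helper: k*(k+1)//2, Python's floor division
def pvTri (k : Int) : Int := PySem.Int.floordiv (k * (k + 1)) 2

-- ===== PORT A =====
-- loop state (count, number); each non-greater element flushes count*(count+1)//2; post-loop flush if count ≠ 0
def greater1 (arr : List Int) (element : Int) : Int :=
  let st := arr.foldl
    (fun (s : Int × Int) x =>
      if x > element then (s.1 + 1, s.2)
      else (0, s.2 + pvTri s.1))
    (0, 0)
  let number := if st.1 ≠ 0 then st.2 + pvTri st.1 else st.2
  number

-- ===== PORT B =====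
-- bounds = [i for i, x in enumerate(arr) if x <= element] + [len(arr)]; then fold over bounds
-- with state (total, prev), adding pvTri of each gap
def greater1_alt (arr : List Int) (element : Int) : Int :=
  let bounds := ((PySem.List.enumerate arr).filter (fun p => decide (p.2 ≤ element))).map Prod.fst
                  ++ [(arr.length : Int)]
  (bounds.foldl (fun (s : Int × Int) b => (s.1 + pvTri (b - s.2 - 1), b)) (0, -1)).1

-- ===== PRECONDITION & SPEC =====
def Spec_greater1 (arr : List Int) (element : Int) (out : Int) : Prop := out = greater1_alt arr element
instance (arr : List Int) (element : Int) (out : Int) : Decidable (Spec_greater1 arr element out) := by unfold Spec_greater1; infer_instance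

-- ===== CLAIM (what is proved, stated in full; the proofs are below) =====
def Claim_equal_greater1 : Prop := ∀ (arr : List Int) (element : Int), Dom_greater1 arr element → Spec_greater1 arr element (greater1 arr element)

-- ===== LEMMAS AND PROOFS =====

-- A's loop (from state (c, n)) followed by the final flush
def pvF (element : Int) (xs : List Int) (c n : Int) : Int :=
  let st := xs.foldl
    (fun (s : Int × Int) x =>
      if x > element then (s.1 + 1, s.2)
      else (0, s.2 + pvTri s.1)) (c, n)
  if st.1 ≠ 0 then st.2 + pvTri st.1 else st.2

-- B's fold over a list of bounds, from state (total, prev)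
def pvB (bs : List Int) (total prev : Int) : Int :=
  (bs.foldl (fun (s : Int × Int) b => (s.1 + pvTri (b - s.2 - 1), b)) (total, prev)).1

-- barrier indices of xs, numbering from s
def pvBIdx (element s : Int) : List Int → List Int
  | [] => []
  | x :: xs => if x ≤ element then s :: pvBIdx element (s + 1) xs else pvBIdx element (s + 1) xs

lemma pvTri_zero : pvTri 0 = 0 := by decide

lemma pv_enum_filter (element : Int) : ∀ (xs : List Int) (s : Int),
    ((PySem.List.enumerate xs s).filter (fun p => decide (p.2 ≤ element))).map Prod.fst
      = pvBIdx element s xs := by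
  intro xs
  induction xs with
  | nil => intro s; simp [PySem.List.enumerate_nil, pvBIdx]
  | cons x xs ih =>
    intro s
    by_cases hx : x ≤ element
    · simp [PySem.List.enumerate_cons, hx, pvBIdx, ih]
    · simp [PySem.List.enumerate_cons, hx, pvBIdx, ih]

lemma pvF_offset (element : Int) : ∀ (xs : List Int) (c n : Int),
    pvF element xs c n = n + pvF element xs c 0 := by
  intro xs
  induction xs with
  | nil =>
    intro c n
    by_cases hc : c = 0 <;> simp [pvF, List.foldl, hc]
  | cons x xs ih =>
    intro c n
    by_cases hx : x > element
    · simp only [pvF, List.foldl, if_pos hx] at *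
      exact ih (c + 1) n
    · simp only [pvF, List.foldl, if_neg hx] at *
      rw [ih 0 (n + pvTri c), ih 0 (0 + pvTri c)]
      ring

lemma pv_main (element : Int) : ∀ (xs : List Int) (i0 prev total : Int),
    pvB (pvBIdx element i0 xs ++ [i0 + (xs.length : Int)]) total prev
      = total + pvF element xs (i0 - prev - 1) 0 := by
  intro xs
  induction xs with
  | nil =>
    intro i0 prev total
    by_cases hc : i0 - prev - 1 = 0 <;>
      simp [pvBIdx, pvB, pvF, List.foldl, hc, pvTri_zero]
  | cons x xs ih =>
    intro i0 prev total
    have hlen : i0 + ((x :: xs).length : Int) = (i0 + 1) + (xs.length : Int) := by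
      simp; ring
    by_cases hx : x > element
    · have hle : ¬ x ≤ element := by omega
      rw [show pvBIdx element i0 (x :: xs) = pvBIdx element (i0 + 1) xs by
            simp [pvBIdx, hle], hlen, ih (i0 + 1) prev total]
      have : pvF element (x :: xs) (i0 - prev - 1) 0
           = pvF element xs (i0 - prev - 1 + 1) 0 := by
        simp only [pvF, List.foldl, if_pos hx]
      rw [this]
      congr 2
      ring
    · have hle : x ≤ element := by omega
      rw [show pvBIdx element i0 (x :: xs) = i0 :: pvBIdx element (i0 + 1) xs by
            simp [pvBIdx, hle], hlen]
      have hstep : pvB (i0 :: (pvBIdx element (i0 + 1) xs ++ [(i0 + 1) + (xs.length : Int)])) total prev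
          = pvB (pvBIdx element (i0 + 1) xs ++ [(i0 + 1) + (xs.length : Int)])
              (total + pvTri (i0 - prev - 1)) i0 := by
        simp [pvB, List.foldl]
      rw [List.cons_append]
      rw [hstep, ih (i0 + 1) i0 (total + pvTri (i0 - prev - 1))]
      have : pvF element (x :: xs) (i0 - prev - 1) 0
           = pvF element xs 0 (0 + pvTri (i0 - prev - 1)) := by
        simp only [pvF, List.foldl, if_neg hx]
      rw [this, pvF_offset element xs 0 (0 + pvTri (i0 - prev - 1))]
      have h10 : i0 + 1 - i0 - 1 = 0 := by ring
      rw [h10]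
      ring

-- ===== VERDICT (by name: the statement is the Claim_ definition above) =====
theorem greater1_spec : Claim_equal_greater1 := by
  intro arr element _
  unfold Spec_greater1
  show pvF element arr 0 0 = greater1_alt arr element
  unfold greater1_alt
  rw [show PySem.List.enumerate arr = PySem.List.enumerate arr 0 from rfl,
      pv_enum_filter element arr 0]
  have := pv_main element arr 0 (-1) 0
  simp only [zero_add] at this
  show pvF element arr 0 0 = pvB (pvBIdx element 0 arr ++ [(arr.length : Int)]) 0 (-1)
  rw [this]
  norm_num
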